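-- pv_equiv track=rewrite | github.com/inaciovasquez2020/cyclone-terminal-obstruction | tools/cyclone/overlap_rank.py | corank_R
-- ===== SOURCE A (Python) =====
-- from typing import List, Tuple
--
-- def gf2_rank(mat: List[List[int]]) -> int:
--     if not mat:
--         return 0
--     A = [row[:] for row in mat]
--     m, n = len(A), len(A[0])
--     r = 0
--     c = 0
--     while r < m and c < n:
--         piv = None
--         for i in range(r, m):
--             if A[i][c] & 1:
--                 piv = i
--                 break
--         if piv is None:
--             c += 1
--             continue
--         A[r], A[piv] = A[piv], A[r]
--         for i in range(m):
--             if i != r and (A[i][c] & 1):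
--                 rowi = A[i]
--                 rowr = A[r]
--                 for j in range(c, n):
--                     rowi[j] ^= rowr[j]
--         r += 1
--         c += 1
--     return r
--
-- def build_adj(n: int, edges: List[Tuple[int,int]]) -> List[List[int]]:
--     adj = [[] for _ in range(n)]
--     for a,b in edges:
--         if a == b:
--             continue
--         if b not in adj[a]:
--             adj[a].append(b)
--         if a not in adj[b]:
--             adj[b].append(a)
--     return adj
--
-- def bfs_ball(adj: List[List[int]], center: int, R: int) -> set[int]:
--     seen = {center}
--     frontier = {center}
--     for _ in range(R):
--         nxt = set()
--         for u in frontier: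
--             for v in adj[u]:
--                 if v not in seen:
--                     seen.add(v)
--                     nxt.add(v)
--         frontier = nxt
--         if not frontier:
--             break
--     return seen
--
-- def restrict_vec_to_ball(n: int, edges: List[Tuple[int,int]], vec: List[int], ball: set[int]) -> List[int]:
--     out = [0]*len(edges)
--     for i,(a,b) in enumerate(edges):
--         if vec[i] and (a in ball or b in ball):
--             out[i] = 1
--     return out
--
-- def corank_R(n: int, edges: List[Tuple[int,int]], basis: List[List[int]], R: int) -> int:
--     adj = build_adj(n, edges)
--     best = 0
--     for v in range(n):
--         ball = bfs_ball(adj, v, R)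
--         mats = [restrict_vec_to_ball(n, edges, c, ball) for c in basis]
--         mats = [row for row in mats if any(row)]
--         best = max(best, gf2_rank(mats))
--     return best
-- ===== SOURCE B (Python) =====
-- from typing import List, Tuple
--
-- def build_adj(n: int, edges: List[Tuple[int,int]]) -> List[List[int]]:
--     adj = [[] for _ in range(n)]
--     for a,b in edges:
--         if a == b:
--             continue
--         if b not in adj[a]:
--             adj[a].append(b)
--         if a not in adj[b]:
--             adj[b].append(a)
--     return adj
--
-- def bfs_ball(adj: List[List[int]], center: int, R: int) -> set:
--     seen = {center}
--     frontier = {center}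
--     for _ in range(R):
--         nxt = set()
--         for u in frontier:
--             for v in adj[u]:
--                 if v not in seen:
--                     seen.add(v)
--                     nxt.add(v)
--         frontier = nxt
--         if not frontier:
--             break
--     return seen
--
-- def corank_R(n: int, edges: List[Tuple[int,int]], basis: List[List[int]], R: int) -> int:
--     adj = build_adj(n, edges)
--     best = 0
--     for v in range(n):
--         ball = bfs_ball(adj, v, R)
--         pivots = {}
--         rank = 0
--         for vec in basis:
--             mask = 0
--             for i, (a, b) in enumerate(edges):
--                 if vec[i] and (a in ball or b in ball):
--                     mask |= 1 << i
--             while mask: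
--                 h = mask.bit_length() - 1
--                 if h in pivots:
--                     mask ^= pivots[h]
--                 else:
--                     pivots[h] = mask
--                     rank += 1
--                     break
--         best = max(best, rank)
--     return best
-- ===== Notes on version B (the rewrite author's own statement) =====
-- stated objective: alternative
-- what changed: Replaces the per-ball list-of-lists GF(2) Gaussian elimination (build restricted 0/1 rows, filter, pivot search with row swaps and full column elimination) by encoding each restricted basis vector directly as one integer bitmask and maintaining an incremental XOR linear basis (dict from highest set bit to pivot mask); the rank is the number of stored pivots.
import Mathlib
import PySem

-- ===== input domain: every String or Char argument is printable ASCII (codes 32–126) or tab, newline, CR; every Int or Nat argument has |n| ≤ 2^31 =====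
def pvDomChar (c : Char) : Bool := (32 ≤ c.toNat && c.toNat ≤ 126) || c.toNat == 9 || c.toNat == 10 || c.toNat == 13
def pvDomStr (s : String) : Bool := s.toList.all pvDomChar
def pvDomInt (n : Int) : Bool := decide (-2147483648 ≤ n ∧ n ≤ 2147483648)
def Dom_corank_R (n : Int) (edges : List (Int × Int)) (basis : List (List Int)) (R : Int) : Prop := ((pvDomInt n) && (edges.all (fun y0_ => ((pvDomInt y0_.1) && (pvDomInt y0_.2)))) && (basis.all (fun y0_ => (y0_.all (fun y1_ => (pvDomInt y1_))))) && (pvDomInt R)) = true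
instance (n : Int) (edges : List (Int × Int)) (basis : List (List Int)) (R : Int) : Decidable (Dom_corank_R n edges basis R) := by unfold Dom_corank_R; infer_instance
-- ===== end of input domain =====

-- B replaces A's list-of-lists GF(2) Gaussian elimination by bitmask encoding plus an
-- incremental XOR linear-basis (pivot table keyed by highest set bit); build_adj/bfs_ball
-- are shared verbatim by both programs.

-- ===== PORT A =====
-- shared helper (identical source text in A and B): build_adj
def build_adj (n : Int) (edges : List (Int × Int)) : List (List Int) :=
  edges.foldl (fun adj p =>
    if p.1 = p.2 then adj
    else
      let adj1 := if p.2 ∈ PySem.List.pyGetD adj p.1 [] then adj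
                  else PySem.List.pySetD adj p.1 (PySem.List.pyGetD adj p.1 [] ++ [p.2])
      if p.1 ∈ PySem.List.pyGetD adj1 p.2 [] then adj1
      else PySem.List.pySetD adj1 p.2 (PySem.List.pyGetD adj1 p.2 [] ++ [p.1]))
    ((PySem.List.pyRange 0 n 1).map (fun _ => ([] : List Int)))

-- shared helper: one round of bfs_ball's 'for _ in range(R)' loop body, then recurse (fuel = R)
def bfs_loop (adj : List (List Int)) (seen frontier : PySem.Set Int) : Nat → PySem.Set Int
  | 0 => seen
  | fuel + 1 =>
    let sn := frontier.foldl (fun (sn : PySem.Set Int × PySem.Set Int) u =>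
        (PySem.List.pyGetD adj u []).foldl (fun (sn : PySem.Set Int × PySem.Set Int) v =>
            if v ∈ sn.1 then sn else (PySem.Set.add sn.1 v, PySem.Set.add sn.2 v)) sn)
      (seen, PySem.Set.empty)
    if sn.2.isEmpty then sn.1 else bfs_loop adj sn.1 sn.2 fuel

-- shared helper (identical source text in A and B): bfs_ball
def bfs_ball (adj : List (List Int)) (center : Int) (R : Int) : PySem.Set Int :=
  bfs_loop adj (PySem.Set.ofList [center]) (PySem.Set.ofList [center]) R.toNat

-- A only: restrict_vec_to_ball ('out = [0]*len(edges); for i,(a,b) in enumerate(edges): …')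
def restrict_vec_to_ball (n : Int) (edges : List (Int × Int)) (vec : List Int) (ball : PySem.Set Int) : List Int :=
  (PySem.List.enumerate edges).foldl (fun out iab =>
    if PySem.List.pyGetD vec iab.1 0 ≠ 0 ∧ (iab.2.1 ∈ ball ∨ iab.2.2 ∈ ball)
    then PySem.List.pySetD out iab.1 1 else out)
    (List.replicate edges.length (0 : Int))

-- A only: gf2_rank's pivot search 'for i in range(r, m): if A[i][c] & 1: piv = i; break'
def find_piv (A : List (List Int)) (i c : Nat) : Option Nat :=
  if h : i < A.length then
    (if PySem.Int.band (((A.getD i []).getD c 0)) 1 ≠ 0 then some i else find_piv A (i + 1) c)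
  else none
termination_by A.length - i

-- A only: 'for j in range(c, n): rowi[j] ^= rowr[j]' (rows of uniform length n)
def xor_from (row rowr : List Int) (c : Nat) : List Int :=
  row.mapIdx (fun j x => if c ≤ j then PySem.Int.bxor x (rowr.getD j 0) else x)

-- A only: 'for i in range(m): if i != r and (A[i][c] & 1): …'
def elim_rows (A : List (List Int)) (rowr : List Int) (r c : Nat) : List (List Int) :=
  A.mapIdx (fun i row => if i ≠ r ∧ PySem.Int.band (row.getD c 0) 1 ≠ 0 then xor_from row rowr c else row)

-- A only: gf2_rank's 'while r < m and c < n' loop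
def gauss_loop (A : List (List Int)) (m n r c : Nat) : Nat :=
  if _h : r < m ∧ c < n then
    match find_piv A r c with
    | none => gauss_loop A m n r (c + 1)
    | some piv =>
      let Ar := A.getD r []
      let Ap := A.getD piv []
      let A1 := (A.set r Ap).set piv Ar
      let A2 := elim_rows A1 (A1.getD r []) r c
      gauss_loop A2 m n (r + 1) (c + 1)
  else r
termination_by n - c
decreasing_by all_goals omega

-- A only: gf2_rank
def gf2_rank (mat : List (List Int)) : Int :=
  if mat.isEmpty then 0
  else (gauss_loop mat mat.length (mat.headD []).length 0 0 : Int)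

def corank_R (n : Int) (edges : List (Int × Int)) (basis : List (List Int)) (R : Int) : Int :=
  let adj := build_adj n edges
  (PySem.List.pyRange 0 n 1).foldl (fun best v =>
    let ball := bfs_ball adj v R
    let mats := basis.map (fun c => restrict_vec_to_ball n edges c ball)
    let mats2 := mats.filter (fun row => row.any (fun x => x ≠ 0))
    max best (gf2_rank mats2)) 0

-- ===== PORT B =====
-- B only: 'mask = 0; for i,(a,b) in enumerate(edges): if vec[i] and (a in ball or b in ball): mask |= 1 << i'
def ball_mask (edges : List (Int × Int)) (vec : List Int) (ball : PySem.Set Int) : Nat :=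
  (PySem.List.enumerate edges).foldl (fun mask iab =>
    if PySem.List.pyGetD vec iab.1 0 ≠ 0 ∧ (iab.2.1 ∈ ball ∨ iab.2.2 ∈ ball)
    then mask ||| (1 <<< iab.1.toNat) else mask) 0

-- B only: 'while mask: h = mask.bit_length()-1; if h in pivots: mask ^= pivots[h] else: pivots[h]=mask; rank += 1; break'
-- (fuel = mask+1 suffices: each xor against a same-top pivot strictly decreases mask)
def reduce_mask (pivots : PySem.Dict Nat Nat) (mask : Nat) : Nat → PySem.Dict Nat Nat × Nat
  | 0 => (pivots, 0)
  | fuel + 1 =>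
    if mask = 0 then (pivots, 0)
    else
      match pivots.get? (Nat.log2 mask) with
      | some p => reduce_mask pivots (mask ^^^ p) fuel
      | none => (pivots.insert (Nat.log2 mask) mask, 1)

def corank_R_alt (n : Int) (edges : List (Int × Int)) (basis : List (List Int)) (R : Int) : Int :=
  let adj := build_adj n edges
  (PySem.List.pyRange 0 n 1).foldl (fun best v =>
    let ball := bfs_ball adj v R
    let pr := basis.foldl (fun (pr : PySem.Dict Nat Nat × Int) vec =>
        let mask := ball_mask edges vec ball
        let step := reduce_mask pr.1 mask (mask + 1)
        (step.1, pr.2 + step.2)) (PySem.Dict.empty, 0)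
    max best pr.2) 0

-- ===== PRECONDITION & SPEC =====
-- Pre_ excludes exactly the inputs where the Python raises IndexError: a non-self-loop edge
-- endpoint outside Python's index range [-n, n) for the adjacency list (self-loops are skipped
-- before indexing), or, when the centre loop runs at all (n > 0), a basis vector shorter than
-- the edge list (restrict_vec_to_ball reads vec[i] for every edge index i).
def Pre_corank_R (n : Int) (edges : List (Int × Int)) (basis : List (List Int)) (R : Int) : Prop :=
  (∀ p ∈ edges, p.1 = p.2 ∨ (-n ≤ p.1 ∧ p.1 < n ∧ -n ≤ p.2 ∧ p.2 < n)) ∧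
  (0 < n → ∀ v ∈ basis, edges.length ≤ v.length)
instance (n : Int) (edges : List (Int × Int)) (basis : List (List Int)) (R : Int) : Decidable (Pre_corank_R n edges basis R) := by unfold Pre_corank_R; infer_instance

def pvWitness_corank_R : Int × (List (Int × Int)) × List (List Int) × Int :=
  (3, [(0, 1), (1, 2)], [[1, 0], [0, 1], [1, 1]], 1)

def Spec_corank_R (n : Int) (edges : List (Int × Int)) (basis : List (List Int)) (R : Int) (out : Int) : Prop := out = corank_R_alt n edges basis R
instance (n : Int) (edges : List (Int × Int)) (basis : List (List Int)) (R : Int) (out : Int) : Decidable (Spec_corank_R n edges basis R out) := by unfold Spec_corank_R; infer_instance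

-- ===== CLAIM (what is proved, stated in full; the proofs are below) =====
def Claim_equal_corank_R : Prop := ∀ (n : Int) (edges : List (Int × Int)) (basis : List (List Int)) (R : Int), Dom_corank_R n edges basis R → Pre_corank_R n edges basis R → Spec_corank_R n edges basis R (corank_R n edges basis R)

-- ===== LEMMAS AND PROOFS =====

-- span of a list of GF(2) bitmasks, as the list of all subset xors
def spn (l : List Nat) : List Nat := l.foldr (fun a S => S ++ S.map (a ^^^ ·)) [0]

theorem spn_nil : spn [] = [0] := rfl
theorem spn_cons (a : Nat) (l : List Nat) : spn (a :: l) = spn l ++ (spn l).map (a ^^^ ·) := rfl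

theorem mem_spn_cons {a x : Nat} {l : List Nat} :
    x ∈ spn (a :: l) ↔ x ∈ spn l ∨ ∃ y ∈ spn l, x = a ^^^ y := by
  simp [spn_cons, eq_comm]

theorem zero_mem_spn (l : List Nat) : 0 ∈ spn l := by
  induction l with
  | nil => simp [spn_nil]
  | cons a l ih => exact mem_spn_cons.mpr (Or.inl ih)

theorem xor_mem_spn {l : List Nat} : ∀ {x y : Nat}, x ∈ spn l → y ∈ spn l → x ^^^ y ∈ spn l := by
  induction l with
  | nil => intro x y hx hy; simp [spn_nil] at *; simp [hx, hy]
  | cons a l ih =>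
    intro x y hx hy
    rcases mem_spn_cons.mp hx with hx | ⟨u, hu, rfl⟩ <;>
      rcases mem_spn_cons.mp hy with hy | ⟨v, hv, rfl⟩
    · exact mem_spn_cons.mpr (Or.inl (ih hx hy))
    · exact mem_spn_cons.mpr (Or.inr ⟨x ^^^ v, ih hx hv, by ac_rfl⟩)
    · exact mem_spn_cons.mpr (Or.inr ⟨u ^^^ y, ih hu hy, by ac_rfl⟩)
    · refine mem_spn_cons.mpr (Or.inl ?_)
      have h2 : (a ^^^ u) ^^^ (a ^^^ v) = a ^^^ (a ^^^ (u ^^^ v)) := by ac_rfl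
      rw [h2, ← Nat.xor_assoc, Nat.xor_self, Nat.zero_xor]; exact ih hu hv
  
theorem self_mem_spn {a : Nat} {l : List Nat} (h : a ∈ l) : a ∈ spn l := by
  induction l with
  | nil => cases h
  | cons b l ih =>
    rcases List.mem_cons.mp h with rfl | h
    · exact mem_spn_cons.mpr (Or.inr ⟨0, zero_mem_spn l, by simp⟩)
    · exact mem_spn_cons.mpr (Or.inl (ih h))

theorem spn_mono {l L : List Nat} (h : ∀ a ∈ l, a ∈ spn L) : ∀ x ∈ spn l, x ∈ spn L := by
  induction l with
  | nil => intro x hx; simp [spn_nil] at hx; subst hx; exact zero_mem_spn L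
  | cons a l ih =>
    intro x hx
    rcases mem_spn_cons.mp hx with hx | ⟨y, hy, rfl⟩
    · exact ih (fun b hb => h b (List.mem_cons_of_mem a hb)) x hx
    · exact xor_mem_spn (h a (List.mem_cons_self)) (ih (fun b hb => h b (List.mem_cons_of_mem a hb)) y hy)

theorem spn_ext_of_mem {l l' : List Nat} (h : ∀ a, a ∈ l ↔ a ∈ l') :
    ∀ x, x ∈ spn l ↔ x ∈ spn l' := by
  intro x
  constructor
  · exact fun hx => spn_mono (fun a ha => self_mem_spn ((h a).mp ha)) x hx
  · exact fun hx => spn_mono (fun a ha => self_mem_spn ((h a).mpr ha)) x hx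

theorem mem_spn_append {u v : List Nat} {x : Nat} :
    x ∈ spn (u ++ v) ↔ ∃ p ∈ spn u, ∃ q ∈ spn v, x = p ^^^ q := by
  induction u generalizing x with
  | nil => simp [spn_nil]
  | cons a u ih =>
    constructor
    · intro hx
      rcases mem_spn_cons.mp hx with hx | ⟨y, hy, rfl⟩
      · rcases ih.mp hx with ⟨p, hp, q, hq, rfl⟩
        exact ⟨p, mem_spn_cons.mpr (Or.inl hp), q, hq, rfl⟩
      · rcases ih.mp hy with ⟨p, hp, q, hq, rfl⟩
        exact ⟨a ^^^ p, mem_spn_cons.mpr (Or.inr ⟨p, hp, rfl⟩), q, hq, by ac_rfl⟩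
    · rintro ⟨p, hp, q, hq, rfl⟩
      rcases mem_spn_cons.mp hp with hp | ⟨y, hy, rfl⟩
      · exact mem_spn_cons.mpr (Or.inl (ih.mpr ⟨p, hp, q, hq, rfl⟩))
      · exact mem_spn_cons.mpr (Or.inr ⟨y ^^^ q, ih.mpr ⟨y, hy, q, hq, rfl⟩, by ac_rfl⟩)

theorem spn_append_ext {G G' l : List Nat} (h : ∀ y, y ∈ spn G ↔ y ∈ spn G') :
    ∀ x, x ∈ spn (G ++ l) ↔ x ∈ spn (G' ++ l) := by
  intro x
  simp only [mem_spn_append]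
  constructor <;> rintro ⟨p, hp, q, hq, rfl⟩
  · exact ⟨p, (h p).mp hp, q, hq, rfl⟩
  · exact ⟨p, (h p).mpr hp, q, hq, rfl⟩

theorem mem_spn_append_singleton {G : List Nat} {x y : Nat} :
    y ∈ spn (G ++ [x]) ↔ y ∈ spn G ∨ ∃ p ∈ spn G, y = p ^^^ x := by
  rw [mem_spn_append]
  constructor
  · rintro ⟨p, hp, q, hq, rfl⟩
    simp only [spn_cons, spn_nil] at hq
    rcases List.mem_append.mp hq with hq | hq
    · simp at hq; subst hq; left; simpa using hp
    · simp at hq; subst hq; right; exact ⟨p, hp, rfl⟩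
  · rintro (hy | ⟨p, hp, rfl⟩)
    · exact ⟨y, hy, 0, zero_mem_spn _, by simp⟩
    · exact ⟨p, hp, x, self_mem_spn (by simp), rfl⟩

theorem mem_spn_append_singleton_of_mem {G : List Nat} {x : Nat} (hx : x ∈ spn G) :
    ∀ y, y ∈ spn (G ++ [x]) ↔ y ∈ spn G := by
  intro y
  rw [mem_spn_append_singleton]
  constructor
  · rintro (hy | ⟨p, hp, rfl⟩)
    · exact hy
    · exact xor_mem_spn hp hx
  · exact Or.inl

-- a Finset-cardinality measure of the span
def spnCard (l : List Nat) : Nat := (spn l).toFinset.card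

theorem spnCard_nil : spnCard [] = 1 := by simp [spnCard, spn_nil]

theorem spnCard_pos (l : List Nat) : 0 < spnCard l :=
  Finset.card_pos.mpr ⟨0, List.mem_toFinset.mpr (zero_mem_spn l)⟩

theorem spnCard_eq_of_ext {l l' : List Nat} (h : ∀ x, x ∈ spn l ↔ x ∈ spn l') :
    spnCard l = spnCard l' := by
  unfold spnCard
  congr 1
  ext x
  simp [h x]

theorem toFinset_spn_append_singleton {G : List Nat} {x : Nat} :
    (spn (G ++ [x])).toFinset = (spn G).toFinset ∪ (spn G).toFinset.image (· ^^^ x) := by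
  ext y
  simp only [Finset.mem_union, Finset.mem_image, List.mem_toFinset, mem_spn_append_singleton]
  tauto

theorem spnCard_append_of_mem {G : List Nat} {x : Nat} (hx : x ∈ spn G) :
    spnCard (G ++ [x]) = spnCard G :=
  spnCard_eq_of_ext (by intro y; rw [mem_spn_append_singleton_of_mem hx])

theorem spnCard_append_of_not_mem {G : List Nat} {x : Nat} (hx : x ∉ spn G) :
    spnCard (G ++ [x]) = 2 * spnCard G := by
  unfold spnCard
  rw [toFinset_spn_append_singleton]
  have hinj : Set.InjOn (· ^^^ x) ((spn G).toFinset : Set Nat) := by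
    intro a _ b _ hab
    simpa using congrArg (· ^^^ x) hab
  have hdisj : Disjoint (spn G).toFinset ((spn G).toFinset.image (· ^^^ x)) := by
    rw [Finset.disjoint_right]
    intro y hy hy'
    rcases Finset.mem_image.mp hy with ⟨p, hp, rfl⟩
    apply hx
    have hpx : (p ^^^ x) ^^^ p = x := by
      have h3 : (p ^^^ x) ^^^ p = (p ^^^ p) ^^^ x := by ac_rfl
      rw [h3, Nat.xor_self, Nat.zero_xor]
    rw [← hpx]
    exact xor_mem_spn (List.mem_toFinset.mp hy') (List.mem_toFinset.mp hp)
  rw [Finset.card_union_of_disjoint hdisj, Finset.card_image_of_injOn hinj]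
  omega

-- greedy rank: count the elements of l independent of G and all earlier elements
def spanCount (G : List Nat) : List Nat → Nat
  | [] => 0
  | x :: l => (if x ∈ spn G then 0 else 1) + spanCount (G ++ [x]) l

theorem spanCount_pow (G l : List Nat) :
    2 ^ spanCount G l * spnCard G = spnCard (G ++ l) := by
  induction l generalizing G with
  | nil => simp [spanCount]
  | cons x l ih =>
    show 2 ^ ((if x ∈ spn G then 0 else 1) + spanCount (G ++ [x]) l) * spnCard G = _
    have happ : G ++ x :: l = (G ++ [x]) ++ l := by simp
    rw [happ, ← ih (G ++ [x])]
    by_cases hx : x ∈ spn G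
    · rw [if_pos hx, spnCard_append_of_mem hx]; ring
    · rw [if_neg hx, spnCard_append_of_not_mem hx]; ring

theorem spanCount_nil_pow (l : List Nat) : 2 ^ spanCount [] l = spnCard l := by
  have := spanCount_pow [] l
  simpa [spnCard_nil] using this

theorem spanCount_nil_ext {l l' : List Nat} (h : ∀ x, x ∈ spn l ↔ x ∈ spn l') :
    spanCount [] l = spanCount [] l' := by
  apply Nat.pow_right_injective (le_refl 2)
  simp only []
  rw [spanCount_nil_pow, spanCount_nil_pow]
  exact spnCard_eq_of_ext h

theorem spanCount_ext_left {G G' : List Nat} (h : ∀ y, y ∈ spn G ↔ y ∈ spn G') (l : List Nat) :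
    spanCount G l = spanCount G' l := by
  have h1 := spanCount_pow G l
  have h2 := spanCount_pow G' l
  have hc : spnCard G = spnCard G' := spnCard_eq_of_ext h
  have hcl : spnCard (G ++ l) = spnCard (G' ++ l) := spnCard_eq_of_ext (spn_append_ext h)
  have hpos := spnCard_pos G
  have : 2 ^ spanCount G l * spnCard G = 2 ^ spanCount G' l * spnCard G := by
    rw [h1, hc, h2, hcl]
  have hpow : (2:Nat) ^ spanCount G l = 2 ^ spanCount G' l := Nat.eq_of_mul_eq_mul_right hpos this
  exact Nat.pow_right_injective (le_refl 2) hpow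

-- dropping zero masks does not change the count
theorem spanCount_filter_ne_zero (G : List Nat) (l : List Nat) :
    spanCount G (l.filter (fun x => x ≠ 0)) = spanCount G l := by
  induction l generalizing G with
  | nil => rfl
  | cons x l ih =>
    by_cases hx : x = 0
    · subst hx
      rw [show ((0:Nat) :: l).filter (fun x => x ≠ 0) = l.filter (fun x => x ≠ 0) by simp]
      rw [ih G]
      show _ = (if (0:Nat) ∈ spn G then 0 else 1) + spanCount (G ++ [0]) l
      rw [if_pos (zero_mem_spn G)]
      rw [spanCount_ext_left (mem_spn_append_singleton_of_mem (zero_mem_spn G)) l]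
      omega
    · rw [show (x :: l).filter (fun x => x ≠ 0) = x :: l.filter (fun x => x ≠ 0) by simp [hx]]
      show (if x ∈ spn G then 0 else 1) + _ = (if x ∈ spn G then 0 else 1) + _
      rw [ih (G ++ [x])]

-- bit lemmas
theorem testBit_spn {c : Nat} {l : List Nat} (h : ∀ y ∈ l, y.testBit c = false) :
    ∀ x ∈ spn l, x.testBit c = false := by
  induction l with
  | nil => intro x hx; simp [spn_nil] at hx; simp [hx]
  | cons a l ih =>
    intro x hx
    rcases mem_spn_cons.mp hx with hx | ⟨y, hy, rfl⟩
    · exact ih (fun y hy => h y (List.mem_cons_of_mem a hy)) x hx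
    · rw [Nat.testBit_xor, h a List.mem_cons_self, ih (fun y hy => h y (List.mem_cons_of_mem a hy)) y hy]
      rfl

theorem not_mem_spn_of_testBit {c : Nat} {p : Nat} {l : List Nat}
    (hp : p.testBit c = true) (h : ∀ y ∈ l, y.testBit c = false) : p ∉ spn l := by
  intro hmem
  have := testBit_spn h p hmem
  rw [hp] at this; cases this

-- the key cons step: a vector with a private bit adds exactly one to the rank
theorem spanCount_cons_private_bit {c : Nat} {p : Nat} {rest : List Nat}
    (hp : p.testBit c = true) (h : ∀ y ∈ rest, y.testBit c = false) :
    spanCount [] (p :: rest) = 1 + spanCount [] rest := by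
  have hpne : p ∉ spn ([] : List Nat) := by
    simp [spn_nil]; intro h0; subst h0; simp [Nat.testBit] at hp
  show (if p ∈ spn ([] : List Nat) then 0 else 1) + spanCount ([] ++ [p]) rest = _
  rw [if_neg hpne]
  congr 1
  -- spanCount [p] rest = spanCount [] rest, via the power formula
  have h1 := spanCount_pow [p] rest
  have h2 := spanCount_pow [] rest
  have hpnotmem : p ∉ spn rest := not_mem_spn_of_testBit hp h
  have hcard2 : spnCard [p] = 2 := by
    have hsp : spn [p] = [0] ++ [0].map (p ^^^ ·) := spn_cons p []
    unfold spnCard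
    rw [hsp]
    have hpne0 : p ≠ 0 := by
      intro h0; subst h0; simp [Nat.testBit] at hp
    have h01 : ([0] ++ [0].map (p ^^^ ·)) = [0, p] := by simp
    rw [h01]
    have : ([0, p] : List Nat).toFinset = {0, p} := by simp
    rw [this, Finset.card_pair (Ne.symm hpne0)]
  have hext : ∀ x, x ∈ spn ([p] ++ rest) ↔ x ∈ spn (rest ++ [p]) :=
    spn_ext_of_mem (by intro a; simp; tauto)
  have hcardpr : spnCard ([p] ++ rest) = 2 * spnCard rest := by
    rw [spnCard_eq_of_ext hext, spnCard_append_of_not_mem hpnotmem]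
  rw [hcard2] at h1
  rw [hcardpr] at h1
  simp [spnCard_nil] at h2
  rw [← h2] at h1
  have : (2:Nat) ^ (spanCount [p] rest + 1) = 2 ^ (spanCount [] rest + 1) := by
    rw [pow_succ, pow_succ]; omega
  have := Nat.pow_right_injective (le_refl 2) this
  simpa using this

-- log2 ("top bit") lemmas
theorem log2_spec {x : Nat} (hx : x ≠ 0) : 2 ^ Nat.log2 x ≤ x ∧ x < 2 ^ (Nat.log2 x + 1) :=
  ⟨Nat.log2_self_le hx, (Nat.log2_lt hx).mp (Nat.lt_succ_self _)⟩

theorem log2_eq_of_bounds {x t : Nat} (h1 : 2 ^ t ≤ x) (h2 : x < 2 ^ (t + 1)) :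
    Nat.log2 x = t := by
  have hp : 0 < 2 ^ t := Nat.two_pow_pos t
  have hx : x ≠ 0 := by omega
  have hlt : Nat.log2 x < t + 1 := (Nat.log2_lt hx).mpr h2
  have hge : ¬ Nat.log2 x < t := by
    intro hcon
    have := (Nat.log2_lt hx).mp hcon
    omega
  omega

theorem testBit_log2 {x : Nat} (hx : x ≠ 0) : x.testBit (Nat.log2 x) = true := by
  obtain ⟨h1, h2⟩ := log2_spec hx
  rw [Nat.testBit_eq_decide_div_mod_eq]
  have hdiv : x / 2 ^ Nat.log2 x = 1 := by
    have hlt : x / 2 ^ Nat.log2 x < 2 := Nat.div_lt_of_lt_mul (by rw [pow_succ] at h2; omega)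
    have hge : 1 ≤ x / 2 ^ Nat.log2 x := (Nat.one_le_div_iff (Nat.two_pow_pos _)).mpr h1
    omega
  simp [hdiv]

theorem testBit_false_of_lt {x i : Nat} (h : x < 2 ^ i) : x.testBit i = false := by
  by_contra hc
  have hb : x.testBit i = true := by revert hc; cases x.testBit i <;> simp
  have := Nat.ge_two_pow_of_testBit hb
  omega

theorem xor_top {x y : Nat} (hx : x ≠ 0) (hy : y ≠ 0) (hne : Nat.log2 x ≠ Nat.log2 y) :
    x ^^^ y ≠ 0 ∧ Nat.log2 (x ^^^ y) = max (Nat.log2 x) (Nat.log2 y) := by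
  suffices h : ∀ a b : Nat, a ≠ 0 → b ≠ 0 → Nat.log2 b < Nat.log2 a →
      a ^^^ b ≠ 0 ∧ Nat.log2 (a ^^^ b) = Nat.log2 a by
    rcases Nat.lt_or_ge (Nat.log2 y) (Nat.log2 x) with hlt | hge
    · have := h x y hx hy hlt
      exact ⟨this.1, by rw [this.2]; omega⟩
    · have hlt : Nat.log2 x < Nat.log2 y := by omega
      have := h y x hy hx hlt
      rw [Nat.xor_comm] at this
      exact ⟨this.1, by rw [this.2]; omega⟩
  intro a b ha hb hlt
  obtain ⟨ha1, ha2⟩ := log2_spec ha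
  have hblt : b < 2 ^ Nat.log2 a := (Nat.log2_lt hb).mp hlt
  have hbitb : b.testBit (Nat.log2 a) = false := testBit_false_of_lt hblt
  have hbita : a.testBit (Nat.log2 a) = true := testBit_log2 ha
  have hbit : (a ^^^ b).testBit (Nat.log2 a) = true := by
    rw [Nat.testBit_xor, hbita, hbitb]; rfl
  have hge : 2 ^ Nat.log2 a ≤ a ^^^ b := Nat.ge_two_pow_of_testBit hbit
  have hp : 0 < 2 ^ Nat.log2 a := Nat.two_pow_pos _
  have hne0 : a ^^^ b ≠ 0 := by omega
  have hub : a ^^^ b < 2 ^ (Nat.log2 a + 1) :=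
    Nat.xor_lt_two_pow ha2 (lt_trans hblt (by rw [pow_succ]; omega))
  exact ⟨hne0, log2_eq_of_bounds hge hub⟩

-- every nonzero element of the span of a distinct-top list has the top of some member
theorem spn_top_mem {vs : List Nat} (hnz : ∀ v ∈ vs, v ≠ 0)
    (hnd : (vs.map Nat.log2).Nodup) :
    ∀ x ∈ spn vs, x = 0 ∨ Nat.log2 x ∈ vs.map Nat.log2 := by
  induction vs with
  | nil => intro x hx; simp [spn_nil] at hx; exact Or.inl hx
  | cons a vs ih =>
    intro x hx
    have hnz' : ∀ v ∈ vs, v ≠ 0 := fun v hv => hnz v (List.mem_cons_of_mem a hv)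
    rw [List.map_cons, List.nodup_cons] at hnd
    have hnd' := hnd.2
    have hanot : Nat.log2 a ∉ vs.map Nat.log2 := hnd.1
    rcases mem_spn_cons.mp hx with hx | ⟨y, hy, rfl⟩
    · rcases ih hnz' hnd' x hx with h0 | hmem
      · exact Or.inl h0
      · exact Or.inr (by rw [List.map_cons]; exact List.mem_cons_of_mem _ hmem)
    · have ha : a ≠ 0 := hnz a List.mem_cons_self
      by_cases hy0 : y = 0
      · subst hy0
        rw [Nat.xor_zero]
        exact Or.inr (by rw [List.map_cons]; exact List.mem_cons_self)
      · rcases ih hnz' hnd' y hy with h0 | hmem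
        · exact absurd h0 hy0
        · have hne : Nat.log2 a ≠ Nat.log2 y := fun hEq => hanot (hEq ▸ hmem)
          have hxt := xor_top ha hy0 hne
          refine Or.inr ?_
          rw [hxt.2, List.map_cons]
          rcases Nat.le_total (Nat.log2 a) (Nat.log2 y) with h | h
          · rw [max_eq_right h]; exact List.mem_cons_of_mem _ hmem
          · rw [max_eq_left h]; exact List.mem_cons_self

-- pivot-table invariant: keys are exactly the top bits of the (nonzero) stored masks
def PivTab (T : PySem.Dict Nat Nat) : Prop :=
  T.keys.Nodup ∧ ∀ p ∈ T.items, p.2 ≠ 0 ∧ Nat.log2 p.2 = p.1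

theorem pivtab_map_log2_values {T : PySem.Dict Nat Nat} (h : PivTab T) :
    T.values.map Nat.log2 = T.keys := by
  simp only [PySem.Dict.values, PySem.Dict.keys, List.map_map]
  exact List.map_congr_left (fun p hp => (h.2 p hp).2)

theorem pivtab_values_nz {T : PySem.Dict Nat Nat} (h : PivTab T) : ∀ v ∈ T.values, v ≠ 0 := by
  intro v hv
  rcases List.mem_map.mp hv with ⟨p, hp, rfl⟩
  exact (h.2 p hp).1

theorem pivtab_spn_top {T : PySem.Dict Nat Nat} (h : PivTab T) :
    ∀ x ∈ spn T.values, x = 0 ∨ Nat.log2 x ∈ T.keys := by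
  intro x hx
  have := spn_top_mem (pivtab_values_nz h) (by rw [pivtab_map_log2_values h]; exact h.1) x hx
  rwa [pivtab_map_log2_values h] at this

theorem reduce_mask_spec :
    ∀ (fuel : Nat) (T : PySem.Dict Nat Nat) (mask : Nat), PivTab T → mask < fuel →
    PivTab (reduce_mask T mask fuel).1 ∧
    (∀ y, y ∈ spn (reduce_mask T mask fuel).1.values ↔ y ∈ spn (T.values ++ [mask])) ∧
    ((reduce_mask T mask fuel).2 = if mask ∈ spn T.values then 0 else 1) := by
  intro fuel
  induction fuel with
  | zero => intro T mask _ h; omega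
  | succ fuel ih =>
    intro T mask hT hlt
    by_cases h0 : mask = 0
    · subst h0
      have hred : reduce_mask T 0 (fuel+1) = (T, 0) := by
        simp [reduce_mask]
      rw [hred]
      refine ⟨hT, ?_, by rw [if_pos (zero_mem_spn _)]⟩
      intro y
      rw [mem_spn_append_singleton_of_mem (zero_mem_spn _)]
    · rcases hp : T.get? (Nat.log2 mask) with _ | p
      · -- fresh top bit: insert
        simp only [reduce_mask, if_neg h0, hp]
        have hcont : T.contains (Nat.log2 mask) = false := by
          rw [PySem.Dict.contains_eq_isSome_get?, hp]; rfl
        have hitems : (T.insert (Nat.log2 mask) mask).items = T.items ++ [(Nat.log2 mask, mask)] :=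
          PySem.Dict.items_insert_of_not_contains T mask hcont
        have hvals : (T.insert (Nat.log2 mask) mask).values = T.values ++ [mask] := by
          simp only [PySem.Dict.values, hitems, List.map_append]; rfl
        have hkeys : (T.insert (Nat.log2 mask) mask).keys = T.keys ++ [Nat.log2 mask] := by
          simp only [PySem.Dict.keys, hitems, List.map_append]; rfl
        have hnotkey : Nat.log2 mask ∉ T.keys := by
          intro hmem
          rw [PySem.Dict.contains_eq_decide_mem_keys] at hcont
          simp at hcont; exact hcont hmem
        refine ⟨⟨?_, ?_⟩, ?_, ?_⟩
        · rw [hkeys]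
          exact List.Nodup.append hT.1 (List.nodup_singleton _) (by
            intro a ha hb; simp at hb; subst hb; exact hnotkey ha)
        · intro p hp'
          rw [hitems] at hp'
          rcases List.mem_append.mp hp' with hp' | hp'
          · exact hT.2 p hp'
          · simp at hp'; subst hp'; exact ⟨h0, rfl⟩
        · intro y; rw [hvals]
        · rw [if_neg]
          intro hmem
          rcases pivtab_spn_top hT mask hmem with h | h
          · exact h0 h
          · exact hnotkey h
      · -- xor against the same-top pivot and recurse
        simp only [reduce_mask, if_neg h0, hp]
        have hpitem : (Nat.log2 mask, p) ∈ T.items := PySem.Dict.mem_items_of_get?_eq_some T hp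
        have hpv : p ∈ T.values := List.mem_map.mpr ⟨_, hpitem, rfl⟩
        have hpnz : p ≠ 0 := (hT.2 _ hpitem).1
        have hptop : Nat.log2 p = Nat.log2 mask := (hT.2 _ hpitem).2
        -- mask ^^^ p < mask
        obtain ⟨hm1, hm2⟩ := log2_spec h0
        obtain ⟨hp1, hp2⟩ := log2_spec hpnz
        rw [hptop] at hp1 hp2
        have hxlt : mask ^^^ p < 2 ^ (Nat.log2 mask + 1) := Nat.xor_lt_two_pow hm2 hp2
        have hbit : (mask ^^^ p).testBit (Nat.log2 mask) = false := by
          rw [Nat.testBit_xor, testBit_log2 h0, ← hptop, testBit_log2 hpnz]; rfl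
        have hxlt2 : mask ^^^ p < 2 ^ Nat.log2 mask := by
          rcases Nat.lt_or_ge (mask ^^^ p) (2 ^ Nat.log2 mask) with h | h
          · exact h
          · exfalso
            have hdiv : (mask ^^^ p) / 2 ^ Nat.log2 mask = 1 := by
              have : (mask ^^^ p) / 2 ^ Nat.log2 mask < 2 :=
                Nat.div_lt_of_lt_mul (by rw [pow_succ] at hxlt; omega)
              have h1 : 1 ≤ (mask ^^^ p) / 2 ^ Nat.log2 mask :=
                (Nat.one_le_div_iff (Nat.two_pow_pos _)).mpr h
              omega
            rw [Nat.testBit_eq_decide_div_mod_eq, hdiv] at hbit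
            simp at hbit
        have hdec : mask ^^^ p < mask := lt_of_lt_of_le hxlt2 hm1
        have hih := ih T (mask ^^^ p) hT (by omega)
        refine ⟨hih.1, ?_, ?_⟩
        · intro y
          rw [hih.2.1 y]
          -- spn (values ++ [mask ^^^ p]) = spn (values ++ [mask])
          constructor
          · intro hy
            rcases mem_spn_append_singleton.mp hy with hy | ⟨q, hq, rfl⟩
            · exact mem_spn_append_singleton.mpr (Or.inl hy)
            · refine mem_spn_append_singleton.mpr (Or.inr ⟨q ^^^ p, xor_mem_spn hq (self_mem_spn hpv), ?_⟩)
              ac_rfl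
          · intro hy
            rcases mem_spn_append_singleton.mp hy with hy | ⟨q, hq, rfl⟩
            · exact mem_spn_append_singleton.mpr (Or.inl hy)
            · refine mem_spn_append_singleton.mpr (Or.inr ⟨q ^^^ p, xor_mem_spn hq (self_mem_spn hpv), ?_⟩)
              have h4 : q ^^^ p ^^^ (mask ^^^ p) = q ^^^ mask ^^^ (p ^^^ p) := by ac_rfl
              rw [h4, Nat.xor_self, Nat.xor_zero]
        · rw [hih.2.2]
          congr 1
          apply propext
          constructor
          · intro hy
            have : (mask ^^^ p) ^^^ p = mask := by
              rw [Nat.xor_assoc, Nat.xor_self, Nat.xor_zero]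
            rw [← this]
            exact xor_mem_spn hy (self_mem_spn hpv)
          · intro hy
            exact xor_mem_spn hy (self_mem_spn hpv)

theorem masks_fold_count (masks : List Nat) :
    ∀ (T : PySem.Dict Nat Nat) (acc : Int) (G : List Nat), PivTab T →
    (∀ y, y ∈ spn T.values ↔ y ∈ spn G) →
    (masks.foldl (fun pr mask =>
        ((reduce_mask pr.1 mask (mask + 1)).1, pr.2 + ((reduce_mask pr.1 mask (mask + 1)).2 : Int)))
      (T, acc)).2 = acc + (spanCount G masks : Int) := by
  induction masks with
  | nil => intro T acc G _ _; simp [spanCount]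
  | cons m masks ih =>
    intro T acc G hT hG
    have hspec := reduce_mask_spec (m + 1) T m hT (Nat.lt_succ_self m)
    rw [List.foldl_cons]
    have hG' : ∀ y, y ∈ spn (reduce_mask T m (m + 1)).1.values ↔ y ∈ spn (G ++ [m]) := by
      intro y
      rw [hspec.2.1 y]
      exact spn_append_ext hG y
    rw [ih _ _ (G ++ [m]) hspec.1 hG']
    have hcnt : (reduce_mask T m (m + 1)).2 = if m ∈ spn G then 0 else 1 := by
      rw [hspec.2.2]
      congr 1
      exact propext (hG m)
    rw [hcnt]
    have hsc : spanCount G (m :: masks) = (if m ∈ spn G then 0 else 1) + spanCount (G ++ [m]) masks := rfl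
    rw [hsc]
    push_cast
    split_ifs <;> ring

theorem rank_fold_eq_spanCount (masks : List Nat) :
    (masks.foldl (fun pr mask =>
        ((reduce_mask pr.1 mask (mask + 1)).1, pr.2 + ((reduce_mask pr.1 mask (mask + 1)).2 : Int)))
      ((PySem.Dict.empty : PySem.Dict Nat Nat), (0 : Int))).2 = (spanCount [] masks : Int) := by
  have h := masks_fold_count masks PySem.Dict.empty 0 [] ⟨by constructor, by intro p hp; cases hp⟩
    (by intro y; rfl)
  simpa using h

-- ===== mask encoding of 0/1 rows =====
def maskOf : List Int → Nat
  | [] => 0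
  | x :: t => (if x ≠ 0 then 1 else 0) + 2 * maskOf t

theorem maskOf_testBit (row : List Int) : ∀ j, (maskOf row).testBit j = decide (row.getD j 0 ≠ 0) := by
  induction row with
  | nil => intro j; simp [maskOf, List.getD]
  | cons x t ih =>
    intro j
    cases j with
    | zero =>
      show (maskOf (x :: t)).testBit 0 = _
      rw [Nat.testBit_zero]
      unfold maskOf
      rcases Decidable.em (x = 0) with h | h <;> simp [h, Nat.add_mul_mod_self_left]
    | succ j =>
      show (maskOf (x :: t)).testBit (j + 1) = _
      rw [Nat.testBit_add_one]
      unfold maskOf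
      have hdiv : ((if x ≠ 0 then 1 else 0) + 2 * maskOf t) / 2 = maskOf t := by
        split_ifs <;> omega
      rw [hdiv, ih j]
      simp [List.getD]

theorem maskOf_eq_zero_iff (row : List Int) : maskOf row = 0 ↔ row.all (fun x => x = 0) := by
  induction row with
  | nil => simp [maskOf]
  | cons x t ih =>
    unfold maskOf
    rcases Decidable.em (x = 0) with h | h
    · simp [h, ih]
    · rw [if_pos (by simpa using h)]
      constructor
      · intro hc; omega
      · intro hc
        simp at hc
        exact absurd hc.1 h

theorem maskOf_any (row : List Int) :
    (row.any fun x => decide ¬x = 0) = decide (¬ maskOf row = 0) := by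
  rcases Decidable.em (maskOf row = 0) with h | h
  · have := (maskOf_eq_zero_iff row).mp h
    simp only [h, decide_not]
    simp only [List.all_eq_true, decide_eq_true_eq] at this
    simp [List.any_eq_false]
    intro x hx
    exact this x hx
  · simp only [decide_not, h]
    have : ¬ row.all (fun x => x = 0) = true := fun hc => h ((maskOf_eq_zero_iff row).mpr hc)
    simp only [List.all_eq_true, decide_eq_true_eq] at this
    push Not at this
    rcases this with ⟨x, hx, hxne⟩
    simp [List.any_eq_true]
    exact ⟨x, hx, hxne⟩

-- the per-edge 0/1 entry both programs compute
def edgeBit (vec : List Int) (ball : PySem.Set Int) (iab : Int × (Int × Int)) : Int :=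
  if PySem.List.pyGetD vec iab.1 0 ≠ 0 ∧ (iab.2.1 ∈ ball ∨ iab.2.2 ∈ ball) then 1 else 0

theorem restrict_core (vec : List Int) (ball : PySem.Set Int) :
    ∀ (es : List (Int × Int)) (pre : List Int),
      (PySem.List.enumerate es (pre.length : Int)).foldl (fun out iab =>
        if PySem.List.pyGetD vec iab.1 0 ≠ 0 ∧ (iab.2.1 ∈ ball ∨ iab.2.2 ∈ ball)
        then PySem.List.pySetD out iab.1 1 else out) (pre ++ List.replicate es.length (0:Int))
      = pre ++ (PySem.List.enumerate es (pre.length : Int)).map (edgeBit vec ball) := by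
  intro es
  induction es with
  | nil => intro pre; simp [PySem.List.enumerate]
  | cons e es ih =>
    intro pre
    rw [PySem.List.enumerate_cons, List.foldl_cons, List.map_cons]
    have hset : (if PySem.List.pyGetD vec (pre.length : Int) 0 ≠ 0 ∧ (e.1 ∈ ball ∨ e.2 ∈ ball)
        then PySem.List.pySetD (pre ++ List.replicate (es.length + 1) (0:Int)) (pre.length : Int) 1
        else pre ++ List.replicate (es.length + 1) (0:Int))
        = (pre ++ [edgeBit vec ball ((pre.length : Int), e)]) ++ List.replicate es.length (0:Int) := by
      rw [List.replicate_succ]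
      unfold edgeBit
      split_ifs with h
      · rw [PySem.List.pySetD_natCast]
        simp
      · simp
    show List.foldl _ _ _ = _
    rw [show (pre ++ List.replicate (e :: es).length (0:Int)) = pre ++ List.replicate (es.length + 1) (0:Int) by rfl]
    rw [hset]
    have hlen : ((pre ++ [edgeBit vec ball ((pre.length : Int), e)]).length : Int) = (pre.length : Int) + 1 := by
      simp
    have := ih (pre ++ [edgeBit vec ball ((pre.length : Int), e)])
    rw [hlen] at this
    rw [this]
    simp

theorem restrict_eq_map (n : Int) (edges : List (Int × Int)) (vec : List Int) (ball : PySem.Set Int) :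
    restrict_vec_to_ball n edges vec ball = (PySem.List.enumerate edges).map (edgeBit vec ball) := by
  have h := restrict_core vec ball edges []
  simpa [restrict_vec_to_ball, PySem.List.enumerate] using h

theorem one_shl_testBit (s j : Nat) : (1 <<< s).testBit j = decide (s = j) := by
  rw [Nat.shiftLeft_eq, one_mul]; exact Nat.testBit_two_pow

-- bit characterization of the ball_mask fold
theorem ball_mask_core (vec : List Int) (ball : PySem.Set Int) :
    ∀ (es : List (Int × Int)) (s acc : Nat) (j : Nat),
      ((PySem.List.enumerate es (s : Int)).foldl (fun mask iab =>
        if PySem.List.pyGetD vec iab.1 0 ≠ 0 ∧ (iab.2.1 ∈ ball ∨ iab.2.2 ∈ ball)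
        then mask ||| (1 <<< iab.1.toNat) else mask) acc).testBit j
      = (acc.testBit j ||
         (decide (s ≤ j) && (maskOf ((PySem.List.enumerate es (s : Int)).map (edgeBit vec ball))).testBit (j - s))) := by
  intro es
  induction es with
  | nil =>
    intro s acc j
    simp [PySem.List.enumerate, maskOf]
  | cons e es ih =>
    intro s acc j
    rw [PySem.List.enumerate_cons, List.foldl_cons, List.map_cons]
    have hcast : ((s : Int) + 1) = ((s + 1 : Nat) : Int) := by push_cast; ring
    rw [hcast, ih (s + 1)]
    -- the new accumulator's bit j
    have hacc' : (if PySem.List.pyGetD vec (s : Int) 0 ≠ 0 ∧ (e.1 ∈ ball ∨ e.2 ∈ ball)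
        then acc ||| (1 <<< ((s : Int).toNat)) else acc).testBit j
        = (acc.testBit j || (decide (s = j) && decide (edgeBit vec ball ((s : Int), e) ≠ 0))) := by
      unfold edgeBit
      split_ifs with h
      · rw [show ((s : Int).toNat) = s by simp, Nat.testBit_or, one_shl_testBit]
        simp
      · simp
    rw [hacc']
    -- bit (j - s) of maskOf (b :: rest) where b = edgeBit …
    have hmo : ∀ k, (maskOf (edgeBit vec ball ((s : Int), e) :: (PySem.List.enumerate es ((s+1 : Nat) : Int)).map (edgeBit vec ball))).testBit k
        = (if k = 0 then decide (edgeBit vec ball ((s : Int), e) ≠ 0)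
           else (maskOf ((PySem.List.enumerate es ((s+1 : Nat) : Int)).map (edgeBit vec ball))).testBit (k - 1)) := by
      intro k
      cases k with
      | zero =>
        rw [maskOf_testBit]
        simp [List.getD]
      | succ k =>
        rw [if_neg (Nat.succ_ne_zero k), maskOf_testBit, maskOf_testBit]
        simp [List.getD]
    rw [hmo (j - s)]
    -- case analysis on j vs s
    rcases Nat.lt_trichotomy j s with hlt | heq | hgt
    · have h1 : ¬ s ≤ j := by omega
      have h2 : ¬ s + 1 ≤ j := by omega
      have h3 : ¬ (s = j) := by omega
      simp [h1, h2, h3]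
    · subst heq
      have h2 : ¬ j + 1 ≤ j := by omega
      simp [h2]
    · have h1 : s ≤ j := by omega
      have h2 : s + 1 ≤ j := by omega
      have h3 : ¬ (s = j) := by omega
      have h4 : j - s ≠ 0 := by omega
      have h5 : j - s - 1 = j - (s + 1) := by omega
      simp [h1, h2, h3, h4, h5]

theorem ball_mask_eq_maskOf_restrict (n : Int) (edges : List (Int × Int)) (vec : List Int)
    (ball : PySem.Set Int) :
    ball_mask edges vec ball = maskOf (restrict_vec_to_ball n edges vec ball) := by
  apply Nat.eq_of_testBit_eq
  intro j
  rw [restrict_eq_map n]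
  unfold ball_mask
  have h := ball_mask_core vec ball edges 0 0 j
  simp only [Nat.cast_zero] at h
  rw [h]
  simp

-- ===== invariants =====
def Ent01 (row : List Int) : Prop := ∀ x ∈ row, x = 0 ∨ x = 1
def RowsOK (L : Nat) (A : List (List Int)) : Prop := ∀ row ∈ A, row.length = L ∧ Ent01 row
def RowClear (c : Nat) (row : List Int) : Prop := ∀ j, j < c → row.getD j 0 = 0

theorem band01 {x : Int} (h : x = 0 ∨ x = 1) : PySem.Int.band x 1 = x := by
  rcases h with rfl | rfl <;> decide

theorem bxor01 {a b : Int} (ha : a = 0 ∨ a = 1) (hb : b = 0 ∨ b = 1) :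
    PySem.Int.bxor a b = 0 ∨ PySem.Int.bxor a b = 1 := by
  rcases ha with rfl | rfl <;> rcases hb with rfl | rfl <;> decide

theorem ent01_getD {row : List Int} (h : Ent01 row) (j : Nat) :
    row.getD j 0 = 0 ∨ row.getD j 0 = 1 := by
  by_cases hj : j < row.length
  · rw [List.getD_eq_getElem row 0 hj]
    exact h _ (List.getElem_mem hj)
  · rw [List.getD_eq_default row 0 (by omega)]
    exact Or.inl rfl

-- find_piv characterizations
theorem find_piv_none (A : List (List Int)) (c : Nat) :
    ∀ (d i : Nat), A.length - i ≤ d → find_piv A i c = none →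
    ∀ k, i ≤ k → k < A.length → PySem.Int.band ((A.getD k []).getD c 0) 1 = 0 := by
  intro d
  induction d with
  | zero => intro i hd _ k hk1 hk2; omega
  | succ d ih =>
    intro i hd hnone k hk1 hk2
    rw [find_piv] at hnone
    rw [dif_pos (by omega : i < A.length)] at hnone
    by_cases hb : PySem.Int.band ((A.getD i []).getD c 0) 1 ≠ 0
    · rw [if_pos hb] at hnone; cases hnone
    · rw [if_neg hb] at hnone
      rcases Nat.eq_or_lt_of_le hk1 with rfl | hk
      · simpa using hb
      · exact ih (i + 1) (by omega) hnone k (by omega) hk2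

theorem find_piv_some (A : List (List Int)) (c : Nat) :
    ∀ (d i piv : Nat), A.length - i ≤ d → find_piv A i c = some piv →
    i ≤ piv ∧ piv < A.length ∧ PySem.Int.band ((A.getD piv []).getD c 0) 1 ≠ 0 := by
  intro d
  induction d with
  | zero =>
    intro i piv hd hsome
    rw [find_piv] at hsome
    rw [dif_neg (by omega)] at hsome
    cases hsome
  | succ d ih =>
    intro i piv hd hsome
    by_cases hi : i < A.length
    · rw [find_piv, dif_pos hi] at hsome
      by_cases hb : PySem.Int.band ((A.getD i []).getD c 0) 1 ≠ 0
      · rw [if_pos hb] at hsome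
        cases hsome
        exact ⟨le_refl _, hi, hb⟩
      · rw [if_neg hb] at hsome
        have := ih (i + 1) piv (by omega) hsome
        exact ⟨by omega, this.2.1, this.2.2⟩
    · rw [find_piv, dif_neg hi] at hsome; cases hsome

-- swapping two entries of a list preserves membership
theorem set_swap_mem {α : Type} (l : List α) (i j : Nat) (d : α)
    (hi : i < l.length) (hj : j < l.length) :
    ∀ y, y ∈ (l.set i (l.getD j d)).set j (l.getD i d) ↔ y ∈ l := by
  intro y
  rw [List.getD_eq_getElem l d hi, List.getD_eq_getElem l d hj]
  constructor
  · intro hy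
    rcases List.mem_iff_getElem.mp hy with ⟨k, hk, hke⟩
    simp only [List.length_set] at hk
    rw [List.getElem_set, List.getElem_set] at hke
    split_ifs at hke <;> subst hke <;> exact List.getElem_mem _
  · intro hy
    rcases List.mem_iff_getElem.mp hy with ⟨k, hk, hke⟩
    rw [List.mem_iff_getElem]
    by_cases hki : k = i
    · refine ⟨j, by simp [List.length_set]; omega, ?_⟩
      rw [List.getElem_set, if_pos rfl]
      simp only [show i = k by omega]
      exact hke
    · by_cases hkj : k = j
      · refine ⟨i, by simp [List.length_set]; omega, ?_⟩
        rw [List.getElem_set]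
        by_cases hji : j = i
        · rw [if_pos hji]
          simp only [show i = k by omega]
          exact hke
        · rw [if_neg hji, List.getElem_set, if_pos rfl]
          simp only [show j = k by omega]
          exact hke
      · refine ⟨k, by simp [List.length_set]; omega, ?_⟩
        rw [List.getElem_set, if_neg (fun h => hkj h.symm), List.getElem_set,
          if_neg (fun h => hki h.symm)]
        exact hke

theorem map_mem_ext {α β : Type} {l l' : List α} (f : α → β)
    (h : ∀ y, y ∈ l ↔ y ∈ l') : ∀ z, z ∈ l.map f ↔ z ∈ l'.map f := by
  intro z
  simp only [List.mem_map]
  constructor <;> rintro ⟨a, ha, rfl⟩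
  · exact ⟨a, (h a).mp ha, rfl⟩
  · exact ⟨a, (h a).mpr ha, rfl⟩

-- eliminating with the head vector preserves the span
theorem spn_cons_map_xor (p : Nat) (l : List Nat) (q : Nat → Bool) :
    ∀ y, y ∈ spn (p :: l.map (fun x => if q x then x ^^^ p else x)) ↔ y ∈ spn (p :: l) := by
  intro y
  constructor
  · apply spn_mono
    intro a ha
    rcases List.mem_cons.mp ha with rfl | ha
    · exact self_mem_spn List.mem_cons_self
    · rcases List.mem_map.mp ha with ⟨x, hx, rfl⟩
      by_cases hq : q x
      · rw [if_pos hq]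
        exact xor_mem_spn (self_mem_spn (List.mem_cons_of_mem p hx)) (self_mem_spn List.mem_cons_self)
      · rw [if_neg hq]
        exact self_mem_spn (List.mem_cons_of_mem p hx)
  · apply spn_mono
    intro a ha
    rcases List.mem_cons.mp ha with rfl | ha
    · exact self_mem_spn List.mem_cons_self
    · by_cases hq : q a
      · have hmem : a ^^^ p ∈ p :: l.map (fun x => if q x then x ^^^ p else x) :=
          List.mem_cons_of_mem p (List.mem_map.mpr ⟨a, ha, by rw [if_pos hq]⟩)
        have : (a ^^^ p) ^^^ p = a := by rw [Nat.xor_assoc, Nat.xor_self, Nat.xor_zero]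
        rw [← this]
        exact xor_mem_spn (self_mem_spn hmem) (self_mem_spn List.mem_cons_self)
      · have hmem : a ∈ p :: l.map (fun x => if q x then x ^^^ p else x) :=
          List.mem_cons_of_mem p (List.mem_map.mpr ⟨a, ha, by rw [if_neg hq]⟩)
        exact self_mem_spn hmem

-- mask of an eliminated row
theorem maskOf_xor_from {row rowr : List Int} {c : Nat} (hlen : row.length = rowr.length)
    (h01r : Ent01 row) (h01p : Ent01 rowr) (hlow : RowClear c rowr) :
    maskOf (xor_from row rowr c) = maskOf row ^^^ maskOf rowr := by
  apply Nat.eq_of_testBit_eq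
  intro j
  rw [maskOf_testBit, Nat.testBit_xor, maskOf_testBit, maskOf_testBit]
  by_cases hj : j < row.length
  · have hj' : j < (xor_from row rowr c).length := by
      simp [xor_from, List.length_mapIdx]; omega
    rw [List.getD_eq_getElem _ 0 hj']
    rw [List.getD_eq_getElem row 0 hj]
    have hxf : (xor_from row rowr c)[j] = if c ≤ j then PySem.Int.bxor row[j] (rowr.getD j 0) else row[j] := by
      simp [xor_from, List.getElem_mapIdx]
    rw [hxf]
    by_cases hc : c ≤ j
    · rw [if_pos hc]
      have hjr : j < rowr.length := by omega
      rw [List.getD_eq_getElem rowr 0 hjr]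
      have ha := h01r row[j] (List.getElem_mem hj)
      have hb := h01p rowr[j] (List.getElem_mem hjr)
      rcases ha with ha | ha <;> rcases hb with hb | hb <;> rw [ha, hb] <;> decide
    · rw [if_neg hc]
      have h0 : rowr.getD j 0 = 0 := hlow j (by omega)
      rw [h0]
      simp
  · have h1 : row.getD j 0 = 0 := List.getD_eq_default row 0 (by omega)
    have h2 : rowr.getD j 0 = 0 := List.getD_eq_default rowr 0 (by omega)
    have h3 : (xor_from row rowr c).getD j 0 = 0 := by
      apply List.getD_eq_default
      simp [xor_from, List.length_mapIdx]; omega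
    rw [h1, h2, h3]
    decide

-- drop of elim_rows past the pivot row
theorem drop_elim_rows (A1 : List (List Int)) (rowr : List Int) (r c : Nat) :
    (elim_rows A1 rowr r c).drop (r + 1)
      = (A1.drop (r + 1)).map (fun row =>
          if PySem.Int.band (row.getD c 0) 1 ≠ 0 then xor_from row rowr c else row) := by
  apply List.ext_getElem
  · simp [elim_rows, List.length_mapIdx]
  · intro i h1 h2
    have hlen : i + (r + 1) < A1.length := by
      simp [elim_rows, List.length_mapIdx] at h1; omega
    rw [List.getElem_drop, List.getElem_map, List.getElem_drop]
    simp only [elim_rows]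
    rw [List.getElem_mapIdx]
    have hne : r + 1 + i ≠ r := by omega
    simp [hne]

theorem length_xor_from (row rowr : List Int) (c : Nat) : (xor_from row rowr c).length = row.length := by
  simp [xor_from, List.length_mapIdx]

theorem ent01_xor_from {row rowr : List Int} {c : Nat} (h01r : Ent01 row) (h01p : Ent01 rowr) :
    Ent01 (xor_from row rowr c) := by
  intro x hx
  rcases List.mem_iff_getElem.mp hx with ⟨j, hj, hje⟩
  have hj' : j < row.length := by rw [length_xor_from] at hj; exact hj
  rw [show (xor_from row rowr c)[j] = if c ≤ j then PySem.Int.bxor row[j] (rowr.getD j 0) else row[j] by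
    simp [xor_from, List.getElem_mapIdx]] at hje
  subst hje
  split_ifs with hc
  · exact bxor01 (h01r _ (List.getElem_mem hj')) (ent01_getD h01p j)
  · exact h01r _ (List.getElem_mem hj')

theorem rowsOK_set {L : Nat} {A : List (List Int)} (hA : RowsOK L A)
    {row : List Int} (hrow : row.length = L ∧ Ent01 row) (i : Nat) : RowsOK L (A.set i row) := by
  intro r hr
  rcases List.mem_or_eq_of_mem_set hr with h | rfl
  · exact hA r h
  · exact hrow

theorem rowsOK_mem_getD {L : Nat} {A : List (List Int)} (hA : RowsOK L A) {i : Nat}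
    (hi : i < A.length) : (A.getD i []).length = L ∧ Ent01 (A.getD i []) := by
  rw [List.getD_eq_getElem A [] hi]
  exact hA _ (List.getElem_mem hi)

-- a matrix whose relevant rows are all zero has zero span count
theorem spanCount_zero_list {ms : List Nat} (h : ∀ x ∈ ms, x = 0) : spanCount [] ms = 0 := by
  rw [← spanCount_filter_ne_zero]
  have : ms.filter (fun x => x ≠ 0) = [] := by
    rw [List.filter_eq_nil_iff]
    intro a ha
    simp [h a ha]
  rw [this]
  rfl

theorem maskOf_zero_of_clear {row : List Int} {L c : Nat} (hlen : row.length = L)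
    (hle : L ≤ c) (hclear : RowClear c row) : maskOf row = 0 := by
  rw [maskOf_eq_zero_iff]
  rw [List.all_eq_true]
  intro x hx
  rcases List.mem_iff_getElem.mp hx with ⟨j, hj, rfl⟩
  have := hclear j (by omega)
  rw [List.getD_eq_getElem row 0 hj] at this
  simp [this]

theorem drop_succ_subset {A1 : List (List Int)} {r : Nat} (hr : r < A1.length) :
    ∀ row ∈ A1.drop (r + 1), row ∈ A1.drop r := by
  intro row hrow
  rw [List.drop_eq_getElem_cons hr]
  exact List.mem_cons_of_mem _ hrow

theorem gauss_loop_spec (L : Nat) :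
    ∀ (k : Nat) (A : List (List Int)) (r c : Nat),
      L - c ≤ k → RowsOK L A → (∀ row ∈ A.drop r, RowClear c row) → r ≤ A.length →
      gauss_loop A A.length L r c = r + spanCount [] ((A.drop r).map maskOf) := by
  intro k
  induction k with
  | zero =>
    intro A r c hk hOK hclear hr
    rw [gauss_loop, dif_neg (by omega : ¬(r < A.length ∧ c < L))]
    have hz : spanCount [] ((A.drop r).map maskOf) = 0 := by
      apply spanCount_zero_list
      intro x hx
      rcases List.mem_map.mp hx with ⟨row, hrow, rfl⟩
      exact maskOf_zero_of_clear (hOK row (List.mem_of_mem_drop hrow)).1 (by omega) (hclear row hrow)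
    omega
  | succ k ih =>
    intro A r c hk hOK hclear hr
    by_cases hcond : r < A.length ∧ c < L
    · obtain ⟨hrm, hcL⟩ := hcond
      rcases hfp : find_piv A r c with _ | piv
      · -- no pivot in column c: the column is all even below r
        rw [gauss_loop, dif_pos ⟨hrm, hcL⟩]
        simp only [hfp]
        apply ih A r (c + 1) (by omega) hOK ?_ hr
        intro row hrow j hj
        rcases Nat.lt_or_ge j c with hjc | hjc
        · exact hclear row hrow j hjc
        · have hjeq : j = c := by omega
          rw [hjeq]
          rcases List.mem_iff_getElem.mp hrow with ⟨t, ht, hte⟩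
          have htlen : r + t < A.length := by
            simp [List.length_drop] at ht; omega
          have hband := find_piv_none A c A.length r (by omega) hfp (r + t) (by omega) htlen
          rw [List.getD_eq_getElem A [] htlen] at hband
          rw [List.getElem_drop] at hte
          rw [hte] at hband
          have h01 := ent01_getD (hOK row (List.mem_of_mem_drop hrow)).2 c
          rw [band01 h01] at hband
          exact hband
      · -- pivot found
        obtain ⟨hrpiv, hpivm, hodd⟩ := find_piv_some A c A.length r piv (by omega) hfp
        rw [gauss_loop, dif_pos ⟨hrm, hcL⟩]
        simp only [hfp]
        set Ar := A.getD r [] with hAr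
        set Ap := A.getD piv [] with hAp
        set A1 := (A.set r Ap).set piv Ar with hA1def
        set rowr := A1.getD r [] with hrowrdef
        set A2 := elim_rows A1 rowr r c with hA2def
        have hlen1 : A1.length = A.length := by simp [hA1def]
        have hlen2 : A2.length = A.length := by simp [hA2def, elim_rows, List.length_mapIdx, hlen1]
        have hrowr_eq : rowr = Ap := by
          rw [hrowrdef, hA1def]
          rw [List.getD_eq_getElem _ [] (by simp; omega)]
          rw [List.getElem_set]
          by_cases hpr : piv = r
          · rw [if_pos hpr, hAr, hAp, hpr]
          · rw [if_neg hpr, List.getElem_set, if_pos rfl]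
        -- swap preserves the row multiset from r on
        have hdropA1 : A1.drop r = ((A.drop r).set 0 Ap).set (piv - r) Ar := by
          rw [hA1def, List.drop_set, if_neg (by omega : ¬ piv < r), List.drop_set,
            if_neg (by omega : ¬ r < r), Nat.sub_self]
        have hAp_eq : Ap = (A.drop r).getD (piv - r) [] := by
          have hh : (A.drop r).getD (piv - r) [] = A[piv]'hpivm := by
            rw [List.getD_eq_getElem _ [] (by simp [List.length_drop]; omega), List.getElem_drop]
            simp [show r + (piv - r) = piv by omega]
          rw [hh, hAp, List.getD_eq_getElem A [] hpivm]
        have hAr_eq : Ar = (A.drop r).getD 0 [] := by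
          have hh : (A.drop r).getD 0 [] = A[r]'hrm := by
            rw [List.getD_eq_getElem _ [] (by simp [List.length_drop]; omega), List.getElem_drop]
            simp
          rw [hh, hAr, List.getD_eq_getElem A [] hrm]
        have hswap : ∀ y, y ∈ A1.drop r ↔ y ∈ A.drop r := by
          intro y
          rw [hdropA1, hAp_eq, hAr_eq]
          exact set_swap_mem (A.drop r) 0 (piv - r) [] (by simp [List.length_drop]; omega)
            (by simp [List.length_drop]; omega) y
        have hOK1 : RowsOK L A1 := by
          rw [hA1def]
          exact rowsOK_set (rowsOK_set hOK (rowsOK_mem_getD hOK hpivm) r) (rowsOK_mem_getD hOK hrm) piv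
        have hclear1 : ∀ row ∈ A1.drop r, RowClear c row := fun row hrow =>
          hclear row ((hswap row).mp hrow)
        have hrowr_mem : rowr ∈ A1.drop r := by
          rw [hrowrdef, List.getD_eq_getElem A1 [] (by omega)]
          rw [List.mem_iff_getElem]
          refine ⟨0, by simp [List.length_drop]; omega, ?_⟩
          rw [List.getElem_drop]
          simp
        have hrowr_rowok := hOK1 rowr (List.mem_of_mem_drop hrowr_mem)
        have hclearR : RowClear c rowr := hclear1 rowr hrowr_mem
        have hoddR : PySem.Int.band (rowr.getD c 0) 1 ≠ 0 := by
          rw [hrowr_eq, hAp]; exact hodd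
        have hgetc : rowr.getD c 0 = 1 := by
          rcases ent01_getD hrowr_rowok.2 c with h | h
          · rw [h] at hoddR
            exact absurd (by decide : PySem.Int.band 0 1 = 0) hoddR
          · exact h
        have hPbit : (maskOf rowr).testBit c = true := by
          rw [maskOf_testBit, hgetc]
          decide
        have hd1 : A1.drop r = rowr :: A1.drop (r + 1) := by
          rw [hrowrdef, List.getD_eq_getElem A1 [] (by omega)]
          exact List.drop_eq_getElem_cons (by omega)
        -- masks of the eliminated tail
        have hkey1 : (A2.drop (r + 1)).map maskOf
            = ((A1.drop (r + 1)).map maskOf).map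
                (fun x => if x.testBit c then x ^^^ maskOf rowr else x) := by
          rw [hA2def, drop_elim_rows, List.map_map, List.map_map]
          apply List.map_congr_left
          intro row hrow
          have hrowOK := hOK1 row (List.mem_of_mem_drop hrow)
          have hcl : RowClear c row := hclear1 row (drop_succ_subset (by omega) row hrow)
          have h01 := ent01_getD hrowOK.2 c
          show maskOf (if PySem.Int.band (row.getD c 0) 1 ≠ 0 then xor_from row rowr c else row)
              = if (maskOf row).testBit c then maskOf row ^^^ maskOf rowr else maskOf row
          rw [band01 h01, maskOf_testBit]
          rcases h01 with h | h
          · rw [h]; simp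
          · rw [h]
            rw [if_pos (by decide), if_pos (by decide)]
            exact maskOf_xor_from (by rw [hrowOK.1, hrowr_rowok.1]) hrowOK.2 hrowr_rowok.2 hclearR
        -- span chain
        have e1 : spanCount [] ((A.drop r).map maskOf) = spanCount [] ((A1.drop r).map maskOf) :=
          spanCount_nil_ext (spn_ext_of_mem (map_mem_ext maskOf (fun y => (hswap y).symm)))
        have e2 : (A1.drop r).map maskOf = maskOf rowr :: (A1.drop (r + 1)).map maskOf := by
          rw [hd1, List.map_cons]
        have e3 : spanCount [] (maskOf rowr :: (A1.drop (r + 1)).map maskOf)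
            = spanCount [] (maskOf rowr :: ((A1.drop (r + 1)).map maskOf).map
                (fun x => if x.testBit c then x ^^^ maskOf rowr else x)) :=
          spanCount_nil_ext (fun y =>
            (spn_cons_map_xor (maskOf rowr) ((A1.drop (r + 1)).map maskOf) (fun x => x.testBit c) y).symm)
        have e4 : spanCount [] (maskOf rowr :: ((A1.drop (r + 1)).map maskOf).map
                (fun x => if x.testBit c then x ^^^ maskOf rowr else x))
            = 1 + spanCount [] (((A1.drop (r + 1)).map maskOf).map
                (fun x => if x.testBit c then x ^^^ maskOf rowr else x)) := by
          apply spanCount_cons_private_bit hPbit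
          intro y hy
          rcases List.mem_map.mp hy with ⟨x, hx, rfl⟩
          by_cases hb : x.testBit c
          · rw [if_pos hb, Nat.testBit_xor, hb, hPbit]
            rfl
          · rw [if_neg hb]
            simpa using hb
        -- invariants for the recursive call
        have hOK2 : RowsOK L A2 := by
          intro row hrow
          rw [hA2def, elim_rows] at hrow
          rcases List.mem_iff_getElem.mp hrow with ⟨t, ht, hte⟩
          rw [List.getElem_mapIdx] at hte
          have htlen : t < A1.length := by simpa [List.length_mapIdx] using ht
          have hA1t := hOK1 _ (List.getElem_mem htlen)
          subst hte
          split_ifs with hc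
          · exact ⟨by rw [length_xor_from, hA1t.1], ent01_xor_from hA1t.2 hrowr_rowok.2⟩
          · exact hA1t
        have hclear2 : ∀ row ∈ A2.drop (r + 1), RowClear (c + 1) row := by
          intro row hrow j hj
          rw [hA2def, drop_elim_rows] at hrow
          rcases List.mem_map.mp hrow with ⟨orig, horig, rfl⟩
          have horigOK := hOK1 orig (List.mem_of_mem_drop horig)
          have hclorig : RowClear c orig := hclear1 orig (drop_succ_subset (by omega) orig horig)
          have hjlen : j < orig.length := by rw [horigOK.1]; omega
          have h01c := ent01_getD horigOK.2 c
          split_ifs with hb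
          · -- eliminated row
            have hjlen' : j < (xor_from orig rowr c).length := by rw [length_xor_from]; omega
            rw [List.getD_eq_getElem _ 0 hjlen']
            rw [show (xor_from orig rowr c)[j] =
              if c ≤ j then PySem.Int.bxor orig[j] (rowr.getD j 0) else orig[j] by
                simp [xor_from, List.getElem_mapIdx]]
            rcases Nat.lt_or_ge j c with hjc | hjc
            · rw [if_neg (by omega)]
              have := hclorig j hjc
              rw [List.getD_eq_getElem orig 0 hjlen] at this
              exact this
            · have hjc' : j = c := by omega
              rw [if_pos (by omega : c ≤ j)]
              have hgj : orig.getD j 0 = orig[j] := List.getD_eq_getElem orig 0 hjlen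
              have horigc : orig.getD j 0 = 1 := by
                rw [hjc']
                rcases h01c with h | h
                · rw [band01 (Or.inl h), h] at hb; simp at hb
                · exact h
              have hrj : rowr.getD j 0 = 1 := by rw [hjc']; exact hgetc
              rw [← hgj, horigc, hrj]
              decide

          · -- untouched row: even at c, clear below c
            rcases Nat.lt_or_ge j c with hjc | hjc
            · exact hclorig j hjc
            · have hjc' : j = c := by omega
              rw [hjc']
              rcases h01c with h | h
              · exact h
              · exfalso
                rw [band01 (Or.inr h), h] at hb
                simp at hb
        have ihh := ih A2 (r + 1) (c + 1) (by omega) hOK2 hclear2 (by omega)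
        rw [hlen2] at ihh
        rw [ihh, e1, e2, e3, e4, hkey1]
        omega
    · rw [gauss_loop, dif_neg hcond]
      rcases not_and_or.mp hcond with hrm | hcl
      · have hnil : A.drop r = [] := List.drop_eq_nil_of_le (by omega)
        rw [hnil]
        simp [spanCount]
      · have hz : spanCount [] ((A.drop r).map maskOf) = 0 := by
          apply spanCount_zero_list
          intro x hx
          rcases List.mem_map.mp hx with ⟨row, hrow, rfl⟩
          exact maskOf_zero_of_clear (hOK row (List.mem_of_mem_drop hrow)).1 (by omega) (hclear row hrow)
        omega

-- ===== glue: gf2_rank as a span count =====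
theorem gf2_rank_eq {L : Nat} (mat : List (List Int)) (hOK : RowsOK L mat)
    (hhead : mat ≠ [] → (mat.headD []).length = L) :
    gf2_rank mat = (spanCount [] (mat.map maskOf) : Int) := by
  rcases mat with _ | ⟨row0, rest⟩
  · rfl
  · rw [gf2_rank]
    rw [if_neg (by simp)]
    have hh : ((row0 :: rest).headD []).length = L := hhead (by simp)
    simp only [List.headD_cons] at hh
    have := gauss_loop_spec L L (row0 :: rest) 0 0 (by omega) hOK
      (by intro r _ j hj; omega) (by omega)
    rw [List.drop_zero] at this
    simp only [List.headD_cons]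
    rw [hh, this]
    simp

-- length of enumerate
theorem length_enumerate {α : Type} (xs : List α) (s : Int) :
    (PySem.List.enumerate xs s).length = xs.length := by
  rw [PySem.List.enumerate_eq_zipIdx_map]
  simp

-- per-ball equality of the two rank computations
theorem per_ball_eq (n : Int) (edges : List (Int × Int)) (basis : List (List Int))
    (ball : PySem.Set Int) :
    gf2_rank (((basis.map (fun c => restrict_vec_to_ball n edges c ball)).filter
        (fun row => row.any (fun x => x ≠ 0))))
      = (basis.foldl (fun (pr : PySem.Dict Nat Nat × Int) vec =>
          ((reduce_mask pr.1 (ball_mask edges vec ball) (ball_mask edges vec ball + 1)).1,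
            pr.2 + ((reduce_mask pr.1 (ball_mask edges vec ball) (ball_mask edges vec ball + 1)).2 : Int)))
          ((PySem.Dict.empty : PySem.Dict Nat Nat), (0 : Int))).2 := by
  set M := basis.map (fun c => restrict_vec_to_ball n edges c ball) with hM
  have hrowlen : ∀ row ∈ M, row.length = edges.length := by
    intro row hrow
    rw [hM] at hrow
    rcases List.mem_map.mp hrow with ⟨vec, _, rfl⟩
    rw [restrict_eq_map n, List.length_map, length_enumerate]
  have hrow01 : ∀ row ∈ M, Ent01 row := by
    intro row hrow
    rw [hM] at hrow
    rcases List.mem_map.mp hrow with ⟨vec, _, rfl⟩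
    rw [restrict_eq_map n]
    intro x hx
    rcases List.mem_map.mp hx with ⟨iab, _, rfl⟩
    unfold edgeBit
    split_ifs <;> simp
  set F := M.filter (fun row => row.any (fun x => x ≠ 0)) with hF
  have hOKF : RowsOK edges.length F := by
    intro row hrow
    have hm : row ∈ M := List.mem_of_mem_filter hrow
    exact ⟨hrowlen row hm, hrow01 row hm⟩
  -- A side = spanCount of masks of M
  have hA : gf2_rank F = (spanCount [] (M.map maskOf) : Int) := by
    rw [gf2_rank_eq F hOKF]
    · congr 1
      have hfm : F.map maskOf = (M.map maskOf).filter (fun x => x ≠ 0) := by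
        rw [List.filter_map]
        rw [hF]
        congr 1
        apply List.filter_congr
        intro row hrow
        show (row.any fun x => x ≠ 0) = (fun x => decide (x ≠ 0)) (maskOf row)
        simpa using maskOf_any row
      rw [hfm, spanCount_filter_ne_zero]
    · intro hne
      rcases hne2 : F with _ | ⟨row0, rest⟩
      · exact absurd hne2 hne
      · simp only [List.headD_cons]
        exact hOKF row0 (by rw [hne2]; exact List.mem_cons_self) |>.1
  rw [hA]
  -- B side
  have hBfold := rank_fold_eq_spanCount (basis.map (fun vec => ball_mask edges vec ball))
  rw [List.foldl_map] at hBfold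
  rw [hBfold]
  congr 2
  rw [hM, List.map_map]
  apply List.map_congr_left
  intro vec _
  exact (ball_mask_eq_maskOf_restrict n edges vec ball).symm

-- the two programs agree for every input
theorem corank_eq (n : Int) (edges : List (Int × Int)) (basis : List (List Int)) (R : Int) :
    corank_R n edges basis R = corank_R_alt n edges basis R := by
  unfold corank_R corank_R_alt
  apply PySem.List.foldl_congr_mem
  intro acc v _
  exact congrArg (max acc)
    (per_ball_eq n edges basis (bfs_ball (build_adj n edges) v R))

-- ===== VERDICT (by name: the statement is the Claim_ definition above) =====
theorem corank_R_spec : Claim_equal_corank_R := by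
  intro n edges basis R _ _
  unfold Spec_corank_R
  exact corank_eq n edges basis R
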